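-- pv_equiv track=rewrite | github.com/Skrol11/string_theory | string-theory.py | is_blanagram
-- ===== SOURCE A (Python) =====
-- def text_process(text):
--     letters = []
--     for sign in text:
--         if sign.isalpha() == True: #Jezeli prawda jest, ze
--             letters.append(sign.lower())
--     text_processed = "".join(letters)
--     return text_processed
--
-- def is_blanagram(text1, text2):
--     """
-- is_blanagram('Justin Timberlake', "I'm a berk but listen")
--     True
--     """
--     text_processed_1 = text_process(text1)
--     text_processed_2 = text_process(text2)
--     if len(text_processed_1) != len(text_processed_2):
--         return False
--
--     dict1 = dict()
--     for letter in text_processed_1: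
--         if letter in dict1.keys():
--             dict1[letter] += 1
--         else:
--             dict1[letter] = 1
--
--     dict2 = dict()
--     for letter in text_processed_2:
--         if letter in dict2.keys():
--             dict2[letter] += 1
--         else:
--             dict2[letter] = 1
--
--     keys1 =list(dict1.keys())
--     for key in keys1:
--         if key in dict2.keys():
--            if dict1[key] == dict2[key]:
--                dict1.pop(key)
--                dict2.pop(key)
--     keys1 =list(dict1.keys())
--     diff_sum = 0
--     for key in keys1:
--         if key in dict2.keys():
--             value1 = dict1[key]
--             value2 = dict2[key]
--             diff = abs(value1-value2)
--             diff_sum += diff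
--         else:
--             diff_sum += dict1[key]
--
--     for key in dict2.keys():
--         if key not in dict1.keys():
--             diff_sum += dict2[key]
--
--     return diff_sum == 2
-- ===== SOURCE B (Python) =====
-- def is_blanagram(text1, text2):
--     p1 = [c.lower() for c in text1 if c.isalpha()]
--     p2 = [c.lower() for c in text2 if c.isalpha()]
--     if len(p1) != len(p2):
--         return False
--     rest = list(p2)
--     misses = 0
--     for ch in p1:
--         if ch in rest:
--             rest.remove(ch)
--         else:
--             misses += 1
--     return misses == 1
-- ===== Notes on version B (the rewrite author's own statement) =====
-- stated objective: alternative
-- what changed: Replaces A's counting dictionaries, pop-equal-keys pass and two difference loops with a greedy multiset-matching algorithm: walk text1's letters once, removing each from a working copy of text2's letters, count the misses, and return misses == 1 (correct because with equal lengths the L1 count distance equals twice the number of unmatched letters).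
import Mathlib
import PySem

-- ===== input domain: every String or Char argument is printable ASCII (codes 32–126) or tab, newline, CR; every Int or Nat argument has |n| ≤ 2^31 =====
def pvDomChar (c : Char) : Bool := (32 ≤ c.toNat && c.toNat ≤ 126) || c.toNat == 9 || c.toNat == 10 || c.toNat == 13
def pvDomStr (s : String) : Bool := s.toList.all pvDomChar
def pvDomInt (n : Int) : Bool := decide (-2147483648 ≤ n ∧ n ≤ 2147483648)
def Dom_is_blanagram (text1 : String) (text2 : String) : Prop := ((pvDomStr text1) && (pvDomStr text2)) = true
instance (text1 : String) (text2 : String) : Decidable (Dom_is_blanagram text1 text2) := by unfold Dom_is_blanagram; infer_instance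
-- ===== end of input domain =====

-- B replaces A's counting dictionaries and pop/diff passes with greedy multiset matching:
-- remove each letter of text1 from a working copy of text2's letters and count the misses; misses == 1.

-- ===== PORT A =====
def textProcess (text : String) : String :=
  String.ofList (text.toList.foldl
    (fun letters sign =>
      if PySem.Chars.isalpha sign = true then letters ++ [PySem.Chars.lowerChar sign] else letters)
    [])

def is_blanagram (text1 : String) (text2 : String) : Bool :=
  let tp1 := textProcess text1
  let tp2 := textProcess text2
  if PySem.Str.len tp1 ≠ PySem.Str.len tp2 then false
  else
    let d1 := tp1.toList.foldl
      (fun d letter =>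
        if d.contains letter then d.insert letter (d.getD letter 0 + 1) else d.insert letter 1)
      (PySem.Dict.empty : PySem.Dict Char Int)
    let d2 := tp2.toList.foldl
      (fun d letter =>
        if d.contains letter then d.insert letter (d.getD letter 0 + 1) else d.insert letter 1)
      (PySem.Dict.empty : PySem.Dict Char Int)
    let keys1 := d1.keys
    let st := keys1.foldl
      (fun (st : PySem.Dict Char Int × PySem.Dict Char Int) key =>
        if st.2.contains key then
          if st.1.getD key 0 == st.2.getD key 0 then (st.1.erase key, st.2.erase key) else st
        else st)
      (d1, d2)
    let keys1' := st.1.keys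
    let diff1 := keys1'.foldl
      (fun diff_sum key =>
        if st.2.contains key then diff_sum + |st.1.getD key 0 - st.2.getD key 0|
        else diff_sum + st.1.getD key 0)
      (0 : Int)
    let diff_sum := st.2.keys.foldl
      (fun diff_sum key =>
        if !st.1.contains key then diff_sum + st.2.getD key 0 else diff_sum)
      diff1
    diff_sum == 2

-- ===== PORT B =====
-- rest.remove(ch) under the 'ch in rest' guard: PySem.List.remove? is some here, getD never fires its default
def is_blanagram_alt (text1 : String) (text2 : String) : Bool :=
  let p1 := (text1.toList.filter PySem.Chars.isalpha).map PySem.Chars.lowerChar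
  let p2 := (text2.toList.filter PySem.Chars.isalpha).map PySem.Chars.lowerChar
  if p1.length ≠ p2.length then false
  else
    let st := p1.foldl
      (fun (st : List Char × Int) ch =>
        if st.1.contains ch then ((PySem.List.remove? st.1 ch).getD st.1, st.2)
        else (st.1, st.2 + 1))
      (p2, (0 : Int))
    st.2 == 1

-- ===== PRECONDITION & SPEC =====
def Spec_is_blanagram (text1 : String) (text2 : String) (out : Bool) : Prop := out = is_blanagram_alt text1 text2
instance (text1 : String) (text2 : String) (out : Bool) : Decidable (Spec_is_blanagram text1 text2 out) := by unfold Spec_is_blanagram; infer_instance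

-- ===== CLAIM (what is proved, stated in full; the proofs are below) =====
def Claim_equal_is_blanagram : Prop := ∀ (text1 : String) (text2 : String), Dom_is_blanagram text1 text2 → Spec_is_blanagram text1 text2 (is_blanagram text1 text2)

-- ===== LEMMAS AND PROOFS =====

theorem pv_find?_ext {α : Type} (l : List α) (p q : α → Bool) (h : ∀ a, p a = q a) :
    l.find? p = l.find? q := by
  induction l with
  | nil => rfl
  | cons a l ih => simp only [List.find?_cons, h a]; split <;> simp [ih]

-- erase on a Dict, pointwise
theorem pv_contains_erase (d : PySem.Dict Char Int) (k k' : Char) :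
    (d.erase k).contains k' = (!(k' == k) && d.contains k') := by
  by_cases h : k' = k
  · subst h
    simp only [PySem.Dict.erase, PySem.Dict.contains, List.any_filter, beq_self_eq_true,
      Bool.not_true, Bool.false_and]
    rw [List.any_eq_false]
    intro p _
    by_cases hp : p.1 = k' <;> simp [hp]
  · simp only [PySem.Dict.erase, PySem.Dict.contains, List.any_filter]
    have h2 : (k' == k) = false := by simp [h]
    rw [h2]
    simp only [Bool.not_false, Bool.true_and]
    apply List.any_congr rfl
    intro p
    by_cases hp : p.1 = k' <;> simp [hp, h]

theorem pv_get?_erase (d : PySem.Dict Char Int) (k k' : Char) :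
    (d.erase k).get? k' = if k' = k then none else d.get? k' := by
  simp only [PySem.Dict.erase, PySem.Dict.get?, List.find?_filter]
  by_cases h : k' = k
  · subst h
    rw [List.find?_eq_none.mpr ?_]
    · simp
    · intro p _
      simp only [decide_eq_true_eq, not_and]
      intro h1 h2
      simp [h2] at h1
  · simp only [h, if_false]
    congr 1
    apply pv_find?_ext
    intro p
    by_cases hp : p.1 = k' <;> simp [hp, h]

theorem pv_getD_erase_of_ne (d : PySem.Dict Char Int) (k k' : Char) (h : k' ≠ k) :
    (d.erase k).getD k' 0 = d.getD k' 0 := by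
  simp [PySem.Dict.getD, pv_get?_erase, h]

theorem pv_keys_erase (d : PySem.Dict Char Int) (k : Char) :
    (d.erase k).keys = d.keys.filter (fun x => !(x == k)) := by
  simp [PySem.Dict.erase, PySem.Dict.keys, List.filter_map, Function.comp_def]

-- erasing a whole list of keys (helper for the pop pass)
def pvEraseAll (l : List Char) (d : PySem.Dict Char Int) : PySem.Dict Char Int :=
  l.foldl PySem.Dict.erase d

theorem pv_keys_eraseAll (l : List Char) (d : PySem.Dict Char Int) :
    (pvEraseAll l d).keys = d.keys.filter (fun x => !(l.contains x)) := by
  induction l generalizing d with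
  | nil => simp [pvEraseAll]
  | cons a l ih =>
    have : pvEraseAll (a :: l) d = pvEraseAll l (d.erase a) := rfl
    rw [this, ih, pv_keys_erase, List.filter_filter]
    apply List.filter_congr
    intro x _
    by_cases hx : x = a <;> simp [hx, Bool.and_comm]

theorem pv_get?_eraseAll (l : List Char) (d : PySem.Dict Char Int) (k : Char) :
    (pvEraseAll l d).get? k = if k ∈ l then none else d.get? k := by
  induction l generalizing d with
  | nil => simp [pvEraseAll]
  | cons a l ih =>
    have : pvEraseAll (a :: l) d = pvEraseAll l (d.erase a) := rfl
    rw [this, ih, pv_get?_erase]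
    by_cases hk : k ∈ l <;> by_cases ha : k = a <;> simp [hk, ha]

theorem pv_getD_eraseAll (l : List Char) (d : PySem.Dict Char Int) (k : Char) :
    (pvEraseAll l d).getD k 0 = if k ∈ l then 0 else d.getD k 0 := by
  simp [PySem.Dict.getD, pv_get?_eraseAll]
  split <;> rfl

theorem pv_contains_eraseAll (l : List Char) (d : PySem.Dict Char Int) (k : Char) :
    (pvEraseAll l d).contains k = (!(l.contains k) && d.contains k) := by
  induction l generalizing d with
  | nil => simp [pvEraseAll]
  | cons a l ih =>
    have : pvEraseAll (a :: l) d = pvEraseAll l (d.erase a) := rfl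
    rw [this, ih, pv_contains_erase]
    by_cases hk : k ∈ l <;> by_cases ha : k = a <;> simp [hk, ha, Bool.and_comm]

-- A's counting loop builds the counter
theorem pv_count_loop (p : List Char) :
    p.foldl
      (fun d letter =>
        if d.contains letter then d.insert letter (d.getD letter 0 + 1) else d.insert letter 1)
      (PySem.Dict.empty : PySem.Dict Char Int) = PySem.Dict.counter p := by
  rw [← PySem.Dict.foldl_insert_getD_add_one_eq_counter]
  apply PySem.List.foldl_congr_mem
  intro d x _
  by_cases h : d.contains x
  · simp [h]
  · have h' : d.contains x = false := by simpa using h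
    simp [h', PySem.Dict.getD_of_not_contains d 0 h']

-- the pop pass = erase the equal-count keys from both dicts
theorem pv_pop_pass (ks : List Char) (d1 d2 : PySem.Dict Char Int) (hnd : ks.Nodup) :
    ks.foldl
      (fun (st : PySem.Dict Char Int × PySem.Dict Char Int) key =>
        if st.2.contains key then
          if st.1.getD key 0 == st.2.getD key 0 then (st.1.erase key, st.2.erase key) else st
        else st)
      (d1, d2)
    = (pvEraseAll (ks.filter (fun k => d2.contains k && (d1.getD k 0 == d2.getD k 0))) d1,
       pvEraseAll (ks.filter (fun k => d2.contains k && (d1.getD k 0 == d2.getD k 0))) d2) := by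
  induction ks generalizing d1 d2 with
  | nil => simp [pvEraseAll]
  | cons k ks ih =>
    have hk : k ∉ ks := (List.nodup_cons.mp hnd).1
    have hnd' : ks.Nodup := (List.nodup_cons.mp hnd).2
    by_cases hc : d2.contains k
    · by_cases he : d1.getD k 0 = d2.getD k 0
      · have hQ : (d2.contains k && (d1.getD k 0 == d2.getD k 0)) = true := by simp [hc, he]
        simp only [List.foldl_cons, hc, if_true, he, beq_self_eq_true, if_true]
        rw [ih (d1.erase k) (d2.erase k) hnd']
        have hfilt : ks.filter (fun k' => (d2.erase k).contains k' && ((d1.erase k).getD k' 0 == (d2.erase k).getD k' 0))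
            = ks.filter (fun k' => d2.contains k' && (d1.getD k' 0 == d2.getD k' 0)) := by
          apply List.filter_congr
          intro x hx
          have hxk : x ≠ k := fun hh => hk (hh ▸ hx)
          have hxe : (x == k) = false := by simp [hxk]
          rw [pv_contains_erase, pv_getD_erase_of_ne _ _ _ hxk, pv_getD_erase_of_ne _ _ _ hxk, hxe]
          simp
        rw [hfilt]
        have hcons : (k :: ks).filter (fun k' => d2.contains k' && (d1.getD k' 0 == d2.getD k' 0))
            = k :: ks.filter (fun k' => d2.contains k' && (d1.getD k' 0 == d2.getD k' 0)) := by
          simp [hQ]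
        rw [hcons]
        rfl
      · have hQ : (d2.contains k && (d1.getD k 0 == d2.getD k 0)) = false := by simp [he]
        simp only [List.foldl_cons, hc, if_true]
        rw [if_neg (by simpa using he)]
        rw [ih d1 d2 hnd']
        simp [hQ]
    · have hc' : d2.contains k = false := by simpa using hc
      simp only [List.foldl_cons, hc', Bool.false_eq_true, if_false]
      rw [ih d1 d2 hnd']
      simp [hc']

-- toFinset of set()
theorem pv_toFinset_ofList (l : List Char) :
    (PySem.Set.ofList l).toFinset = l.toFinset := by
  apply Finset.ext
  intro x
  simp [PySem.Set.mem_ofList]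

theorem pv_sums_eq (p1 p2 : List Char) :
    (((PySem.Set.ofList p1).filter
        (fun x => !((PySem.Set.ofList p1).filter
          (fun k => p2.contains k && ((p1.count k : Int) == (p2.count k : Int)))).contains x)).map
      (fun k => |(p1.count k : Int) - (p2.count k : Int)|)).sum
    + (((PySem.Set.ofList p2).filter
        (fun x => !((PySem.Set.ofList p1).filter
          (fun k => p2.contains k && ((p1.count k : Int) == (p2.count k : Int)))).contains x)).map
      (fun k => if k ∈ p1 then (0 : Int) else |(p1.count k : Int) - (p2.count k : Int)|)).sum
    = ((PySem.Set.ofList (p1 ++ p2)).map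
        (fun ch => |(p1.count ch : Int) - (p2.count ch : Int)|)).sum := by
  have hn1 := PySem.Set.nodup_ofList p1
  have hn2 := PySem.Set.nodup_ofList p2
  have hn12 := PySem.Set.nodup_ofList (p1 ++ p2)
  set f : Char → Int := fun k => |(p1.count k : Int) - (p2.count k : Int)| with hf
  set E : List Char := (PySem.Set.ofList p1).filter
      (fun k => p2.contains k && ((p1.count k : Int) == (p2.count k : Int))) with hE
  have hmemE : ∀ k, k ∈ E → (p1.count k : Int) = (p2.count k : Int) := by
    intro k hk
    rw [hE, List.mem_filter] at hk
    have := hk.2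
    simp only [Bool.and_eq_true, beq_iff_eq] at this
    exact this.2
  have hnotE : ∀ k, k ∉ p1 → k ∉ E := by
    intro k hk hkE
    rw [hE, List.mem_filter, PySem.Set.mem_ofList] at hkE
    exact hk hkE.1
  rw [← List.sum_toFinset f (hn1.filter _), ← List.sum_toFinset _ (hn2.filter _),
      ← List.sum_toFinset f hn12]
  rw [List.toFinset_filter, List.toFinset_filter, pv_toFinset_ofList, pv_toFinset_ofList,
      pv_toFinset_ofList, List.toFinset_append]
  have hA : ∑ x ∈ p1.toFinset with (!E.contains x) = true, f x = ∑ x ∈ p1.toFinset, f x := by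
    rw [Finset.sum_filter]
    apply Finset.sum_congr rfl
    intro k hk
    by_cases hkE : k ∈ E
    · have : f k = 0 := by rw [hf]; simp [hmemE k hkE]
      simp [this]
    · simp [hkE]
  have hB : ∑ x ∈ p2.toFinset with (!E.contains x) = true,
        (if x ∈ p1 then (0 : Int) else f x) = ∑ x ∈ p2.toFinset \ p1.toFinset, f x := by
    rw [Finset.sum_filter, Finset.sdiff_eq_filter, Finset.sum_filter]
    apply Finset.sum_congr rfl
    intro k hk
    by_cases hp : k ∈ p1
    · simp [hp, List.mem_toFinset]
    · have hkE := hnotE k hp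
      simp [hkE, hp, List.mem_toFinset]
  rw [hA, hB, ← Finset.union_sdiff_self_eq_union,
      Finset.sum_union Finset.disjoint_sdiff]

-- the first difference loop, as a sum
theorem pv_fold_first (p1 p2 E : List Char) :
    ((PySem.Set.ofList p1).filter (fun x => !(E.contains x))).foldl
      (fun diff_sum key =>
        if (pvEraseAll E (PySem.Dict.counter p2)).contains key = true then
          diff_sum +
            |(pvEraseAll E (PySem.Dict.counter p1)).getD key 0 -
              (pvEraseAll E (PySem.Dict.counter p2)).getD key 0|
        else diff_sum + (pvEraseAll E (PySem.Dict.counter p1)).getD key 0) (0 : Int)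
    = (((PySem.Set.ofList p1).filter (fun x => !(E.contains x))).map
        (fun k => |(p1.count k : Int) - (p2.count k : Int)|)).sum := by
  rw [PySem.List.foldl_congr_mem _ _
    (fun acc k => acc + |(p1.count k : Int) - (p2.count k : Int)|) _ ?_]
  · rw [PySem.List.foldl_add, zero_add]
  · intro acc x hx
    rw [List.mem_filter] at hx
    have hxE : E.contains x = false := by simpa using hx.2
    have hxE' : x ∉ E := by simpa [List.contains_iff_mem] using hxE
    rw [pv_contains_eraseAll, pv_getD_eraseAll, pv_getD_eraseAll, hxE]
    simp only [hxE', if_false, Bool.not_false, Bool.true_and,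
      PySem.Dict.contains_counter, PySem.Dict.getD_counter]
    by_cases hp2 : x ∈ p2
    · simp [hp2]
    · have hc2 : List.count x p2 = 0 := List.count_eq_zero.mpr hp2
      have hcont : p2.contains x = false := by simpa [List.contains_iff_mem] using hp2
      rw [hcont, hc2]
      simp [abs_of_nonneg (Int.natCast_nonneg (List.count x p1))]

-- the second difference loop, as a sum
theorem pv_fold_second (p1 p2 E : List Char) (d : Int) :
    ((PySem.Set.ofList p2).filter (fun x => !(E.contains x))).foldl
      (fun diff_sum key =>
        if (!(pvEraseAll E (PySem.Dict.counter p1)).contains key) = true then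
          diff_sum + (pvEraseAll E (PySem.Dict.counter p2)).getD key 0
        else diff_sum) d
    = d + (((PySem.Set.ofList p2).filter (fun x => !(E.contains x))).map
        (fun k => if k ∈ p1 then (0 : Int) else |(p1.count k : Int) - (p2.count k : Int)|)).sum := by
  rw [PySem.List.foldl_congr_mem _ _
    (fun acc k => acc + if k ∈ p1 then (0 : Int) else |(p1.count k : Int) - (p2.count k : Int)|) _ ?_]
  · rw [PySem.List.foldl_add]
  · intro acc x hx
    rw [List.mem_filter] at hx
    have hxE : E.contains x = false := by simpa using hx.2
    have hxE' : x ∉ E := by simpa [List.contains_iff_mem] using hxE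
    rw [pv_contains_eraseAll, pv_getD_eraseAll, hxE]
    simp only [hxE', if_false, Bool.not_false, Bool.true_and,
      PySem.Dict.contains_counter, PySem.Dict.getD_counter]
    by_cases hp1 : x ∈ p1
    · simp [hp1]
    · have hc1 : List.count x p1 = 0 := List.count_eq_zero.mpr hp1
      have hcont : p1.contains x = false := by simpa [List.contains_iff_mem] using hp1
      rw [hcont, hc1]
      simp [hp1, abs_of_nonneg (Int.natCast_nonneg (List.count x p2))]

-- A's else-branch equals the L1 distance of the letter counts, over the processed letter lists
theorem pv_core (p1 p2 : List Char) :
    (let d1 := p1.foldl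
        (fun d letter =>
          if d.contains letter then d.insert letter (d.getD letter 0 + 1) else d.insert letter 1)
        (PySem.Dict.empty : PySem.Dict Char Int)
     let d2 := p2.foldl
        (fun d letter =>
          if d.contains letter then d.insert letter (d.getD letter 0 + 1) else d.insert letter 1)
        (PySem.Dict.empty : PySem.Dict Char Int)
     let st := d1.keys.foldl
        (fun (st : PySem.Dict Char Int × PySem.Dict Char Int) key =>
          if st.2.contains key then
            if st.1.getD key 0 == st.2.getD key 0 then (st.1.erase key, st.2.erase key) else st
          else st)
        (d1, d2)
     let diff1 := st.1.keys.foldl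
        (fun diff_sum key =>
          if st.2.contains key then diff_sum + |st.1.getD key 0 - st.2.getD key 0|
          else diff_sum + st.1.getD key 0)
        (0 : Int)
     st.2.keys.foldl
        (fun diff_sum key =>
          if !st.1.contains key then diff_sum + st.2.getD key 0 else diff_sum)
        diff1)
    = ((PySem.List.dedup (p1 ++ p2)).map
        (fun ch => |(p1.count ch : Int) - (p2.count ch : Int)|)).sum := by
  simp only [pv_count_loop, PySem.Dict.keys_counter]
  rw [pv_pop_pass (PySem.Set.ofList p1) _ _ (PySem.Set.nodup_ofList p1)]
  rw [pv_keys_eraseAll, pv_keys_eraseAll, PySem.Dict.keys_counter, PySem.Dict.keys_counter]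
  rw [pv_fold_first, pv_fold_second]
  simp only [PySem.Dict.contains_counter, PySem.Dict.getD_counter, PySem.List.dedup_eq_ofList]
  exact pv_sums_eq p1 p2

-- ===== B-side lemmas: the matching loop counts card (↑p1 - ↑p2) =====

theorem pv_msub_cons_mem (ch : Char) (s t : Multiset Char) (h : ch ∈ t) :
    (ch ::ₘ s) - t = s - t.erase ch := by
  ext x
  by_cases hx : x = ch
  · subst hx
    rw [Multiset.count_sub, Multiset.count_sub, Multiset.count_cons_self, Multiset.count_erase_self]
    have := Multiset.one_le_count_iff_mem.mpr h
    omega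
  · rw [Multiset.count_sub, Multiset.count_sub, Multiset.count_cons_of_ne hx,
      Multiset.count_erase_of_ne hx]

theorem pv_msub_cons_not_mem (ch : Char) (s t : Multiset Char) (h : ch ∉ t) :
    (ch ::ₘ s) - t = ch ::ₘ (s - t) := by
  ext x
  rw [Multiset.count_sub, Multiset.count_cons, Multiset.count_cons, Multiset.count_sub]
  have hc : t.count ch = 0 := Multiset.count_eq_zero.mpr h
  by_cases hx : x = ch
  · subst hx; simp only [hc]; omega
  · simp only [hx, if_false]; omega

theorem pv_match_loop (l : List Char) : ∀ (rest : List Char) (m : Int),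
    (l.foldl
      (fun (st : List Char × Int) ch =>
        if st.1.contains ch then ((PySem.List.remove? st.1 ch).getD st.1, st.2)
        else (st.1, st.2 + 1))
      (rest, m)).2
    = m + (Multiset.card ((l : Multiset Char) - (rest : Multiset Char)) : Int) := by
  induction l with
  | nil => intro rest m; simp
  | cons ch l ih =>
    intro rest m
    by_cases hc : ch ∈ rest
    · have hcont : rest.contains ch = true := by simpa [List.contains_iff_mem] using hc
      rw [List.foldl_cons]
      simp only [hcont, if_true, PySem.List.remove?_eq_some_erase _ _ hc, Option.getD_some]
      rw [ih (rest.erase ch) m]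
      have : ((ch :: l : List Char) : Multiset Char) - (rest : Multiset Char)
          = (l : Multiset Char) - ((rest.erase ch : List Char) : Multiset Char) := by
        rw [← Multiset.cons_coe, ← Multiset.coe_erase]
        exact pv_msub_cons_mem ch _ _ (by simpa using hc)
      rw [this]
    · have hcont : rest.contains ch = false := by simpa [List.contains_iff_mem] using hc
      rw [List.foldl_cons]
      simp only [hcont, Bool.false_eq_true, if_false]
      rw [ih rest (m + 1)]
      have : ((ch :: l : List Char) : Multiset Char) - (rest : Multiset Char)
          = ch ::ₘ ((l : Multiset Char) - (rest : Multiset Char)) := by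
        rw [← Multiset.cons_coe]
        exact pv_msub_cons_not_mem ch _ _ (by simpa using hc)
      rw [this, Multiset.card_cons]
      push_cast
      ring

-- card of a truncated difference, as a sum of positive parts over any covering finset
theorem pv_card_sub_eq_sum (p q : List Char) (S : Finset Char) (h : p.toFinset ⊆ S) :
    (Multiset.card ((p : Multiset Char) - (q : Multiset Char)) : Int)
      = ∑ x ∈ S, max ((p.count x : Int) - (q.count x : Int)) 0 := by
  rw [← Multiset.toFinset_sum_count_eq ((p : Multiset Char) - (q : Multiset Char))]
  have hsub : ((p : Multiset Char) - (q : Multiset Char)).toFinset ⊆ S := by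
    intro x hx
    apply h
    rw [Multiset.mem_toFinset] at hx
    have := Multiset.mem_of_le (Multiset.sub_le_self _ _) hx
    simpa [List.mem_toFinset] using this
  rw [Finset.sum_subset hsub ?_]
  · push_cast
    apply Finset.sum_congr rfl
    intro x _
    rw [Multiset.count_sub]
    simp only [Multiset.coe_count]
    omega
  · intro x _ hx
    rw [Multiset.mem_toFinset] at hx
    exact Multiset.count_eq_zero.mpr hx

theorem pv_sum_count_eq_length (p : List Char) (S : Finset Char) (h : p.toFinset ⊆ S) :
    ∑ x ∈ S, (p.count x : Int) = (p.length : Int) := by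
  have h' : (p : Multiset Char).toFinset ⊆ S := h
  rw [← Finset.sum_subset h' (by
    intro x _ hx
    rw [Multiset.mem_toFinset] at hx
    have : p.count x = 0 := List.count_eq_zero.mpr (by simpa using hx)
    simp [this])]
  have hn : ∑ x ∈ (p : Multiset Char).toFinset, Multiset.count x (p : Multiset Char)
      = p.length := by
    rw [Multiset.toFinset_sum_count_eq]; simp
  calc ∑ x ∈ (p : Multiset Char).toFinset, (p.count x : Int)
      = ((∑ x ∈ (p : Multiset Char).toFinset, Multiset.count x (p : Multiset Char) : Nat) : Int) := by
        push_cast; apply Finset.sum_congr rfl; intro x _; simp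
    _ = (p.length : Int) := by rw [hn]

-- at equal lengths: L1 distance == 2  ↔  number of unmatched letters == 1
theorem pv_l1_eq_two_misses (p1 p2 : List Char) (hlen : p1.length = p2.length) :
    (((PySem.List.dedup (p1 ++ p2)).map
        (fun ch => |(p1.count ch : Int) - (p2.count ch : Int)|)).sum == 2)
    = ((0 + (Multiset.card ((p1 : Multiset Char) - (p2 : Multiset Char)) : Int)) == 1) := by
  set S : Finset Char := (p1 ++ p2).toFinset with hS
  have h1 : p1.toFinset ⊆ S := by rw [hS, List.toFinset_append]; exact Finset.subset_union_left
  have h2 : p2.toFinset ⊆ S := by rw [hS, List.toFinset_append]; exact Finset.subset_union_right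
  have hL1 : ((PySem.List.dedup (p1 ++ p2)).map
      (fun ch => |(p1.count ch : Int) - (p2.count ch : Int)|)).sum
      = ∑ x ∈ S, |(p1.count x : Int) - (p2.count x : Int)| := by
    rw [PySem.List.dedup_eq_ofList, ← List.sum_toFinset _ (PySem.Set.nodup_ofList _),
      pv_toFinset_ofList]
  have habs : ∀ x : Char, |(p1.count x : Int) - (p2.count x : Int)|
      = max ((p1.count x : Int) - (p2.count x : Int)) 0
        + max ((p2.count x : Int) - (p1.count x : Int)) 0 := by
    intro x; rcases abs_cases ((p1.count x : Int) - (p2.count x : Int)) with ⟨h, _⟩ | ⟨h, _⟩ <;> omega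
  have hsplit : ∑ x ∈ S, |(p1.count x : Int) - (p2.count x : Int)|
      = (Multiset.card ((p1 : Multiset Char) - (p2 : Multiset Char)) : Int)
        + (Multiset.card ((p2 : Multiset Char) - (p1 : Multiset Char)) : Int) := by
    rw [pv_card_sub_eq_sum p1 p2 S h1, pv_card_sub_eq_sum p2 p1 S h2, ← Finset.sum_add_distrib]
    exact Finset.sum_congr rfl (fun x _ => habs x)
  have hbal : (Multiset.card ((p1 : Multiset Char) - (p2 : Multiset Char)) : Int)
      = (Multiset.card ((p2 : Multiset Char) - (p1 : Multiset Char)) : Int) := by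
    have e1 := pv_card_sub_eq_sum p1 p2 S h1
    have e2 := pv_card_sub_eq_sum p2 p1 S h2
    have hdiff : ∑ x ∈ S, max ((p1.count x : Int) - (p2.count x : Int)) 0
        - ∑ x ∈ S, max ((p2.count x : Int) - (p1.count x : Int)) 0
        = ∑ x ∈ S, ((p1.count x : Int) - (p2.count x : Int)) := by
      rw [← Finset.sum_sub_distrib]
      exact Finset.sum_congr rfl (fun x _ => by omega)
    have hzero : ∑ x ∈ S, ((p1.count x : Int) - (p2.count x : Int)) = 0 := by
      rw [Finset.sum_sub_distrib, pv_sum_count_eq_length p1 S h1,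
        pv_sum_count_eq_length p2 S h2, hlen]
      ring
    omega
  rw [hL1, hsplit, ← hbal, zero_add]
  rcases eq_or_ne (Multiset.card ((p1 : Multiset Char) - (p2 : Multiset Char)) : Int) 1 with h | h
  · rw [h]; norm_num
  · have h2' : (Multiset.card ((p1 : Multiset Char) - (p2 : Multiset Char)) : Int)
        + (Multiset.card ((p1 : Multiset Char) - (p2 : Multiset Char)) : Int) ≠ 2 := by omega
    rw [beq_eq_false_iff_ne.mpr h2', beq_eq_false_iff_ne.mpr h]

-- ===== VERDICT (by name: the statement is the Claim_ definition above) =====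
theorem is_blanagram_spec : Claim_equal_is_blanagram := by
  intro text1 text2 _
  unfold Spec_is_blanagram is_blanagram is_blanagram_alt textProcess
  rw [PySem.List.foldl_append_if, PySem.List.foldl_append_if]
  simp only [List.nil_append, String.toList_ofList, PySem.Str.len]
  set p1 := (text1.toList.filter PySem.Chars.isalpha).map PySem.Chars.lowerChar with hp1
  set p2 := (text2.toList.filter PySem.Chars.isalpha).map PySem.Chars.lowerChar with hp2
  by_cases hlen : p1.length = p2.length
  · simp only [hlen, ne_eq, not_true_eq_false, if_false]
    have h := pv_core p1 p2
    simp only [] at h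
    rw [h, pv_match_loop p1 p2 0]
    exact pv_l1_eq_two_misses p1 p2 hlen
  · simp [hlen]
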